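-- pv_equiv track=rewrite | github.com/gomeznico/EulerProblems | problem76/problem76.py | possible_sums_BF
-- ===== SOURCE A (Python) =====
-- def possible_sums_BF(n,memo={}):
--     if n == 1: return set([(1,)])
--     if n == 2: return set([(1,1)])
--     if n in memo: return memo[n]
--
--     combos = set()
--     for i in range(1,n):
--         prev_combos = possible_sums_BF(i,memo)
--         diff = n-i
--         new = [tuple(sorted(list(c) +[diff])) for c in prev_combos]
--         combos.update(new)
--         # add (i, n-i)
--         combos.add(tuple(sorted([i,diff])))
--
--     memo[n] = combos
--     return combos
-- ===== SOURCE B (Python) =====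
-- # Bottom-up DP: table[k] is the set of all multi-part partitions of k
-- # (ascending tuples).  Each partition is inserted exactly once — a partition
-- # with largest part m is produced only at step i = k - m, recognised by the
-- # max-part bound c[-1] <= m — so there is no duplicate generation, no
-- # per-tuple sorting and no re-insertion, unlike A's generate-and-deduplicate
-- # recursion.  memo is accepted for signature compatibility but not used
-- # (A only mutates it as a cache; cached values never change the result).
-- def possible_sums_BF(n, memo={}):
--     if n == 1:
--         return {(1,)}
--     if n < 1:
--         return set()
--     table = [set(), {(1,)}, {(1, 1)}]
--     for k in range(3, n + 1):
--         s = set()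
--         for i in range(1, k):
--             m = k - i
--             for c in table[i]:
--                 if c[-1] <= m:
--                     s.add(c + (m,))
--             if 2 <= i <= m:
--                 s.add((i, m))
--         table.append(s)
--     return table[n]
-- ===== Notes on version B (the rewrite author's own statement) =====
-- stated objective: faster
-- what changed: Replaces A's memoized recursion, which re-generates every partition once per distinct part (list-building, sorting each candidate tuple and deduplicating through set updates), by a bottom-up DP table in which each multi-part partition of k is inserted exactly once at its largest part (recognised by the max-part bound c[-1] <= m), with no sorting and no duplicate generation.
import Mathlib
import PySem

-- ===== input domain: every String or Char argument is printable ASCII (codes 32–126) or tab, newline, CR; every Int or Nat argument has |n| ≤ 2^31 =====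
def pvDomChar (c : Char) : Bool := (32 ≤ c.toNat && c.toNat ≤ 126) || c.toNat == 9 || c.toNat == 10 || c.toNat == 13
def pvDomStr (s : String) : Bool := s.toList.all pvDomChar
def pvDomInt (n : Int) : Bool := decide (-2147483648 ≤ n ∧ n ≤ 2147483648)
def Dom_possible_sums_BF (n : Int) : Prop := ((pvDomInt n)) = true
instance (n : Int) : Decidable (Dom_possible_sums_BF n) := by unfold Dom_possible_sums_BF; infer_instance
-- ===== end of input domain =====

-- B replaces A's memoized generate-sort-and-deduplicate recursion over sets by a
-- bottom-up DP table that emits every multi-part partition exactly once (objective: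
-- faster / no duplicate generation).  A mutates its default-argument cache `memo`;
-- the equivalence proved here is about the RETURN value only (the cached values
-- never change any return value).

-- ===== PORT A =====
-- one iteration of A's 'for i in range(1, n)' loop (rec = the recursive call)
def aStep (rec : Int → PySem.Dict Int (List (List Int)) → (List (List Int)) × PySem.Dict Int (List (List Int)))
    (n : Int) (st : (List (List Int)) × PySem.Dict Int (List (List Int))) (i : Int) :
    (List (List Int)) × PySem.Dict Int (List (List Int)) :=
  let pr := rec i st.2
  let diff := n - i
  let new := pr.1.map (fun c => PySem.List.sorted (c ++ [diff]) (fun x => x))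
  let combos := PySem.Set.update st.1 new
  let combos := PySem.Set.add combos (PySem.List.sorted [i, diff] (fun x => x))
  (combos, pr.2)

-- A's body; the Python memo dict is threaded through the recursion.  fuel is only
-- a termination bound (every call has n.toNat < fuel, so fuel never runs out).
def aAux (fuel : Nat) (n : Int) (memo : PySem.Dict Int (List (List Int))) :
    (List (List Int)) × PySem.Dict Int (List (List Int)) :=
  if n = 1 then (PySem.Set.ofList [[1]], memo)
  else if n = 2 then (PySem.Set.ofList [[1, 1]], memo)
  else
    match memo.get? n with
    | some v => (v, memo)
    | none =>
      match fuel with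
      | 0 => ([], memo)  -- unreachable: fuel is chosen larger than n
      | Nat.succ fuel' =>
        let r := (PySem.List.pyRange 1 n).foldl
          (aStep (fun i m => aAux fuel' i m) n) ((PySem.Set.empty : PySem.Set (List Int)), memo)
        (r.1, r.2.insert n r.1)

def possible_sums_BF (n : Int) : List (List Int) :=
  (aAux (n.toNat + 1) n PySem.Dict.empty).1

-- ===== PORT B =====
-- table[k] is the set of the partitions of k into ≥ 2 ascending parts; each is
-- inserted exactly once (largest part m first arises at i = k - m, recognised by
-- the bound c[-1] ≤ m).  c[-1] is PySem.List.pyGetD c (-1) 0 (c is never empty),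
-- table[i] is PySem.List.pyGetD table i [] (i is always in range); the Python
-- iterates its sets, modelled as always by PySem.Set's first-insertion order.
-- body of B's inner 'for i in range(1, k)' loop
def bInner (k : Int) (table : List (PySem.Set (List Int))) (s : PySem.Set (List Int)) (i : Int) :
    PySem.Set (List Int) :=
  let m := k - i
  let s := (PySem.List.pyGetD table i []).foldl (fun s c =>
    if PySem.List.pyGetD c (-1) 0 ≤ m then PySem.Set.add s (c ++ [m]) else s) s
  if 2 ≤ i ∧ i ≤ m then PySem.Set.add s [i, m] else s

-- body of B's outer 'for k in range(3, n + 1)' loop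
def bStep (table : List (PySem.Set (List Int))) (k : Int) : List (PySem.Set (List Int)) :=
  let s := (PySem.List.pyRange 1 k).foldl (bInner k table) PySem.Set.empty
  table ++ [s]

def possible_sums_BF_alt (n : Int) : List (List Int) :=
  if n = 1 then PySem.Set.ofList [[1]]
  else if n < 1 then PySem.Set.ofList []
  else
    let table : List (PySem.Set (List Int)) :=
      [PySem.Set.empty, PySem.Set.ofList [[1]], PySem.Set.ofList [[1, 1]]]
    let table := (PySem.List.pyRange 3 (n + 1)).foldl bStep table
    PySem.List.pyGetD table n []

-- ===== PRECONDITION & SPEC =====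
def Spec_possible_sums_BF (n : Int) (out : List (List Int)) : Prop := out = possible_sums_BF_alt n
instance (n : Int) (out : List (List Int)) : Decidable (Spec_possible_sums_BF n out) := by unfold Spec_possible_sums_BF; infer_instance

-- ===== CLAIM (what is proved, stated in full; the proofs are below) =====
def Claim_equal_possible_sums_BF : Prop := ∀ (n : Int), Dom_possible_sums_BF n → Spec_possible_sums_BF n (possible_sums_BF n)

-- ===== LEMMAS AND PROOFS =====

-- c[-1] with default 0: the last (= largest) part of a partition
def lastD (c : List Int) : Int := PySem.List.pyGetD c (-1) 0

-- the partitions of k whose largest part is k - i, in the shared order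
def gBlock (g : List (List Int)) (k i : Nat) : List (List Int) :=
  (g.filter (fun c => lastD c ≤ (k : Int) - (i : Int))).map (fun c => c ++ [(k : Int) - (i : Int)])
  ++ (if 2 ≤ i ∧ 2 * i ≤ k then [[(i : Int), (k : Int) - (i : Int)]] else [])

-- the common value of both ports for argument k ≥ 1 (G 1 = [[1]] as in A)
def G (k : Nat) : List (List Int) :=
  if k = 1 then [[1]]
  else if k = 2 then [[1, 1]]
  else if k < 3 then []
  else (List.range (k - 1)).attach.flatMap (fun j => gBlock (G (j.1 + 1)) k (j.1 + 1))
termination_by k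
decreasing_by
  have := List.mem_range.mp j.2; omega

def blockF (k i : Nat) : List (List Int) := gBlock (G i) k i

def Blocks (k j : Nat) : List (List Int) := (List.range j).flatMap (fun t => blockF k (t + 1))

def IsPart (k : Int) (t : List Int) : Prop :=
  2 ≤ t.length ∧ t.Pairwise (· ≤ ·) ∧ (∀ x ∈ t, 1 ≤ x) ∧ t.sum = k

def MemG (k : Nat) (t : List Int) : Prop :=
  (k = 1 ∧ t = [1]) ∨ (2 ≤ k ∧ IsPart (k : Int) t)

lemma G_eq3 {k : Nat} (hk : 3 ≤ k) :
    G k = (List.range (k - 1)).flatMap (fun j => blockF k (j + 1)) := by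
  rw [G]
  have h1 : ¬ k = 1 := by omega
  have h2 : ¬ k = 2 := by omega
  have h3 : ¬ k < 3 := by omega
  simp [h1, h2, h3, blockF, List.flatMap_eq_foldl]

lemma lastD_append (c : List Int) (d : Int) : lastD (c ++ [d]) = d := by
  simp [lastD, PySem.List.pyGetD_neg_one_append_singleton]

lemma lastD_mem {t : List Int} (h : t ≠ []) : lastD t ∈ t := by
  rw [lastD, PySem.List.pyGetD_neg_one _ _ h]
  exact List.getLast_mem h

lemma le_getLast_of_pairwise : ∀ {t : List Int}, t.Pairwise (· ≤ ·) → ∀ {x : Int}, x ∈ t →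
    ∀ (h : t ≠ []), x ≤ t.getLast h := by
  intro t
  induction t with
  | nil => intro _ x hx; simp at hx
  | cons a rest ih =>
    intro hp x hx h
    rcases List.mem_cons.mp hx with rfl | hx'
    · cases rest with
      | nil => simp
      | cons b r =>
        rw [List.getLast_cons (by simp)]
        exact (List.pairwise_cons.mp hp).1 _ (List.getLast_mem _)
    · have hr : rest ≠ [] := List.ne_nil_of_mem hx'
      rw [List.getLast_cons hr]
      exact ih (List.pairwise_cons.mp hp).2 hx' hr

lemma le_lastD {t : List Int} (hp : t.Pairwise (· ≤ ·)) {x : Int} (hx : x ∈ t) : x ≤ lastD t := by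
  have h : t ≠ [] := List.ne_nil_of_mem hx
  rw [lastD, PySem.List.pyGetD_neg_one _ _ h]
  exact le_getLast_of_pairwise hp hx h

lemma length_le_sum : ∀ {t : List Int}, (∀ x ∈ t, 1 ≤ x) → (t.length : Int) ≤ t.sum := by
  intro t
  induction t with
  | nil => simp
  | cons a r ih =>
    intro h
    simp only [List.length_cons, List.sum_cons]
    have h1 := h a (by simp)
    have h2 := ih (fun x hx => h x (by simp [hx]))
    push_cast
    omega

lemma mem_add_length_le_sum {t : List Int} (h : ∀ x ∈ t, 1 ≤ x) {x : Int} (hx : x ∈ t) :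
    x + (t.length : Int) ≤ t.sum + 1 := by
  have hperm : t.Perm (x :: t.erase x) := List.perm_cons_erase hx
  have hsum : t.sum = x + (t.erase x).sum := by
    have := hperm.sum_eq; simpa using this
  have hlen : t.length = (t.erase x).length + 1 := by
    have := hperm.length_eq; simpa using this
  have hrest : ((t.erase x).length : Int) ≤ (t.erase x).sum :=
    length_le_sum (fun y hy => h y (List.mem_of_mem_erase hy))
  rw [hsum, hlen]
  push_cast
  omega

lemma sorted_append_of_le {c : List Int} {d : Int} (hp : c.Pairwise (· ≤ ·))
    (hle : ∀ x ∈ c, x ≤ d) : PySem.List.sorted (c ++ [d]) (fun x => x) = c ++ [d] := by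
  apply PySem.List.sorted_id_eq_of_perm_of_pairwise _ _ (List.Perm.refl _)
  rw [List.pairwise_append]
  exact ⟨hp, by simp, by simpa using hle⟩

lemma sorted_pair_le {a b : Int} (h : a ≤ b) :
    PySem.List.sorted [a, b] (fun x => x) = [a, b] := by
  apply PySem.List.sorted_id_eq_of_perm_of_pairwise _ _ (List.Perm.refl _)
  simp [h]

lemma sorted_pair_gt {a b : Int} (h : b ≤ a) :
    PySem.List.sorted [a, b] (fun x => x) = [b, a] := by
  apply PySem.List.sorted_id_eq_of_perm_of_pairwise _ _ (List.Perm.swap a b [])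
  simp [h]

lemma memG_props {i : Nat} {t : List Int} (h : MemG i t) :
    t.Pairwise (· ≤ ·) ∧ (∀ x ∈ t, 1 ≤ x) ∧ t.sum = (i : Int) ∧ 1 ≤ t.length := by
  rcases h with ⟨hi, ht⟩ | ⟨h2, hl, hp, hpos, hs⟩
  · subst ht; refine ⟨by simp, by simp, by simp [hi], by simp⟩
  · exact ⟨hp, hpos, hs, by omega⟩

lemma lastD_singleton (a : Int) : lastD [a] = a := by
  simpa using lastD_append [] a

lemma mem_gBlock {k i : Nat} (hk : 3 ≤ k) (hi1 : 1 ≤ i) (hik : i < k)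
    (g : List (List Int)) (hg : ∀ t, t ∈ g ↔ MemG i t) (t : List Int) :
    t ∈ gBlock g k i ↔ (IsPart (k : Int) t ∧ lastD t = (k : Int) - (i : Int)) := by
  have hm1 : (1 : Int) ≤ (k : Int) - (i : Int) := by push_cast; omega
  set m : Int := (k : Int) - (i : Int) with hm
  have hsum_im : (i : Int) + m = (k : Int) := by omega
  constructor
  · intro ht
    rcases List.mem_append.mp ht with hmap | hpair
    · obtain ⟨c, hcf, rfl⟩ := List.mem_map.mp hmap
      obtain ⟨hcg, hcd⟩ := List.mem_filter.mp hcf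
      have hcd' : lastD c ≤ m := by simpa using hcd
      obtain ⟨hp, hpos, hs, hl⟩ := memG_props ((hg c).mp hcg)
      refine ⟨⟨by simp; omega, ?_, ?_, ?_⟩, lastD_append c m⟩
      · rw [List.pairwise_append]
        refine ⟨hp, by simp, ?_⟩
        intro x hx y hy
        simp only [List.mem_singleton] at hy
        subst hy
        exact le_trans (le_lastD hp hx) hcd'
      · intro x hx
        rcases List.mem_append.mp hx with h | h
        · exact hpos x h
        · simp only [List.mem_singleton] at h; omega
      · rw [List.sum_append, hs]; simpa using hsum_im
    · revert hpair
      split_ifs with hcond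
      · intro hpair
        simp only [List.mem_singleton] at hpair
        subst hpair
        obtain ⟨hi2, h2i⟩ := hcond
        have him : (i : Int) ≤ m := by push_cast; omega
        refine ⟨⟨by simp, ?_, ?_, ?_⟩, ?_⟩
        · simp; omega
        · intro x hx
          simp only [List.mem_cons, List.mem_singleton] at hx
          rcases hx with rfl | rfl | h
          · push_cast; omega
          · omega
          · simp at h
        · simpa using hsum_im
        · simpa using lastD_append [(i : Int)] m
      · intro hpair; simp at hpair
  · rintro ⟨⟨hl, hp, hpos, hs⟩, hlast⟩
    have hne : t ≠ [] := by intro h; subst h; simp at hl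
    obtain ⟨c, x, rfl⟩ : ∃ c x, t = c ++ [x] :=
      ⟨t.dropLast, t.getLast hne, (List.dropLast_append_getLast hne).symm⟩
    have hx : x = m := by rw [lastD_append] at hlast; exact hlast
    subst hx
    have hcp : c.Pairwise (· ≤ ·) := (List.pairwise_append.mp hp).1
    have hcle : ∀ y ∈ c, y ≤ m := by
      intro y hy
      exact (List.pairwise_append.mp hp).2.2 y hy m (by simp)
    have hcpos : ∀ y ∈ c, 1 ≤ y := fun y hy => hpos y (List.mem_append_left _ hy)
    have hcsum : c.sum = (i : Int) := by
      have h1 : c.sum + m = (k : Int) := by simpa using hs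
      omega
    have hclen : 1 ≤ c.length := by simp at hl; omega
    rcases Nat.lt_or_ge c.length 2 with hsmall | hbig
    · obtain ⟨a, rfl⟩ : ∃ a, c = [a] := by
        cases c with
        | nil => simp at hclen
        | cons a r =>
          cases r with
          | nil => exact ⟨a, rfl⟩
          | cons b s => simp at hsmall
      have ha : a = (i : Int) := by simpa using hcsum
      subst ha
      by_cases hi2 : 2 ≤ i
      · apply List.mem_append_right
        have h2i : 2 * i ≤ k := by
          have := hcle (i : Int) (by simp)
          push_cast at this ⊢
          omega
        rw [if_pos ⟨hi2, h2i⟩]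
        simp [hm]
      · have hi1' : i = 1 := by omega
        apply List.mem_append_left
        apply List.mem_map.mpr
        refine ⟨[(i : Int)], List.mem_filter.mpr ⟨(hg _).mpr ?_, ?_⟩, rfl⟩
        · exact Or.inl ⟨hi1', by rw [hi1']; norm_num⟩
        · have : lastD [(i : Int)] ≤ m := by rw [lastD_singleton]; push_cast; omega
          simpa using this
    · have hi2 : 2 ≤ i := by
        have := length_le_sum hcpos
        rw [hcsum] at this
        omega
      apply List.mem_append_left
      apply List.mem_map.mpr
      refine ⟨c, List.mem_filter.mpr ⟨(hg c).mpr (Or.inr ⟨hi2, hbig, hcp, hcpos, hcsum⟩), ?_⟩, rfl⟩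
      have : lastD c ≤ m := hcle _ (lastD_mem (by intro h; subst h; simp at hclen))
      simpa using this

lemma isPart_two {t : List Int} : IsPart 2 t ↔ t = [1, 1] := by
  constructor
  · rintro ⟨hl, hp, hpos, hs⟩
    have hlen : (t.length : Int) ≤ 2 := by rw [← hs]; exact length_le_sum hpos
    have hlen2 : t.length = 2 := by omega
    obtain ⟨a, b, rfl⟩ : ∃ a b, t = [a, b] := by
      cases t with
      | nil => simp at hlen2
      | cons a r =>
        cases r with
        | nil => simp at hlen2
        | cons b s =>
          cases s with
          | nil => exact ⟨a, b, rfl⟩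
          | cons c u => simp at hlen2
    have ha := hpos a (by simp)
    have hb := hpos b (by simp)
    have hab : a + b = 2 := by simpa using hs
    have hle : a ≤ b := by
      have := List.pairwise_cons.mp hp
      exact this.1 b (by simp)
    have : a = 1 ∧ b = 1 := by omega
    simp [this.1, this.2]
  · rintro rfl
    refine ⟨by simp, by simp, by intro x hx; simp at hx; omega, by simp⟩

lemma mem_G : ∀ (k : Nat) (t : List Int), t ∈ G k ↔ MemG k t := by
  intro k
  induction k using Nat.strong_induction_on with
  | _ k ih =>
  intro t
  rcases Nat.lt_or_ge k 3 with hk | hk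
  · interval_cases k
    · rw [G]; simp [MemG]
    · rw [G]; simp [MemG]
    · rw [G]; simp only [MemG]; norm_num [isPart_two]
  · rw [G_eq3 hk]
    simp only [List.mem_flatMap, List.mem_range]
    constructor
    · rintro ⟨j, hj, ht⟩
      have hmem := (mem_gBlock hk (by omega) (by omega) (G (j + 1))
        (ih (j + 1) (by omega)) t).mp ht
      exact Or.inr ⟨by omega, hmem.1⟩
    · intro hM
      rcases hM with ⟨h1, _⟩ | ⟨h2, hl, hp, hpos, hs⟩
      · omega
      · have hne : t ≠ [] := by intro h; subst h; simp at hl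
        have hMpos : 1 ≤ lastD t := hpos _ (lastD_mem hne)
        have hMle : lastD t + 2 ≤ (k : Int) + 1 := by
          have h1 := mem_add_length_le_sum hpos (lastD_mem hne)
          have hlen : (2 : Int) ≤ (t.length : Int) := by exact_mod_cast hl
          rw [hs] at h1
          omega
        have hMt : ((lastD t).toNat : Int) = lastD t := Int.toNat_of_nonneg (by omega)
        refine ⟨k - 1 - (lastD t).toNat, by omega, ?_⟩
        have hjj : k - 1 - (lastD t).toNat + 1 = k - (lastD t).toNat := by omega
        rw [hjj]
        show t ∈ gBlock (G (k - (lastD t).toNat)) k (k - (lastD t).toNat)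
        refine (mem_gBlock hk (by omega) (by omega) _
          (ih _ (by omega)) t).mpr ⟨⟨hl, hp, hpos, hs⟩, ?_⟩
        push_cast [hjj]
        omega

lemma nodup_flatMap_key {l : List Nat} (hl : l.Nodup) (f : Nat → List (List Int))
    (key : List Int → Int) (kf : Nat → Int) (hkf : ∀ j j', j ∈ l → j' ∈ l → kf j = kf j' → j = j')
    (h1 : ∀ j ∈ l, (f j).Nodup) (h2 : ∀ j ∈ l, ∀ t ∈ f j, key t = kf j) :
    (l.flatMap f).Nodup := by
  induction l with
  | nil => simp
  | cons a l ihl =>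
    rw [List.flatMap_cons, List.nodup_append]
    refine ⟨h1 a (by simp), ihl (List.nodup_cons.mp hl).2
      (fun j j' hj hj' => hkf j j' (by simp [hj]) (by simp [hj']))
      (fun j hj => h1 j (by simp [hj])) (fun j hj => h2 j (by simp [hj])), ?_⟩
    intro t ht t' ht' heq
    subst heq
    obtain ⟨j, hj, htj⟩ := List.mem_flatMap.mp ht'
    have e1 : key t = kf a := h2 a (by simp) t ht
    have e2 : key t = kf j := h2 j (by simp [hj]) t htj
    have : a = j := hkf a j (by simp) (by simp [hj]) (e1 ▸ e2)
    subst this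
    exact (List.nodup_cons.mp hl).1 hj

lemma nodup_gBlock {k i : Nat} (hk : 3 ≤ k) (hi1 : 1 ≤ i) (hik : i < k)
    (hnd : (G i).Nodup) : (blockF k i).Nodup := by
  unfold blockF gBlock
  rw [List.nodup_append]
  refine ⟨?_, ?_, ?_⟩
  · apply List.Nodup.map_on
    · intro c hc c' hc' heq
      have := congrArg List.dropLast heq
      simpa using this
    · exact List.Nodup.filter _ hnd
  · split_ifs <;> simp
  · intro t ht t' ht' heq
    subst heq
    obtain ⟨c, hcf, rfl⟩ := List.mem_map.mp ht
    have hcg : c ∈ G i := (List.mem_filter.mp hcf).1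
    rcases (mem_G i c).mp hcg with ⟨hi', rfl⟩ | ⟨hi2, hl, _⟩
    · revert ht'
      split_ifs with hcond
      · omega
      · simp
    · revert ht'
      split_ifs with hcond
      · intro ht'
        simp only [List.mem_singleton] at ht'
        have := congrArg List.length ht'
        simp at this
        omega
      · simp

lemma nodup_G : ∀ (k : Nat), (G k).Nodup := by
  intro k
  induction k using Nat.strong_induction_on with
  | _ k ih =>
  rcases Nat.lt_or_ge k 3 with hk | hk
  · interval_cases k
    · rw [G]; simp
    · rw [G]; simp
    · rw [G]; norm_num
  · rw [G_eq3 hk]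
    apply nodup_flatMap_key (List.nodup_range) _ lastD (fun j => (k : Int) - ((j : Int) + 1))
    · intro j j' hj hj' he
      rw [List.mem_range] at hj hj'
      omega
    · intro j hj
      rw [List.mem_range] at hj
      exact nodup_gBlock hk (by omega) (by omega : j + 1 < k) (ih (j + 1) (by omega))
    · intro j hj t ht
      rw [List.mem_range] at hj
      have := (mem_gBlock hk (by omega) (by omega : j + 1 < k) (G (j + 1))
        (mem_G (j + 1)) t).mp ht
      push_cast
      push_cast at this
      omega

lemma mem_blockF {k i : Nat} (hk : 3 ≤ k) (hi1 : 1 ≤ i) (hik : i < k) (t : List Int) :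
    t ∈ blockF k i ↔ (IsPart (k : Int) t ∧ lastD t = (k : Int) - (i : Int)) :=
  mem_gBlock hk hi1 hik (G i) (mem_G i) t

lemma Blocks_succ (k j : Nat) : Blocks k (j + 1) = Blocks k j ++ blockF k (j + 1) := by
  unfold Blocks
  rw [List.range_succ, List.flatMap_append]
  simp

lemma lastD_le_of_isPart {k : Int} {t : List Int} (h : IsPart k t) : lastD t + 2 ≤ k + 1 := by
  obtain ⟨hl, hp, hpos, hs⟩ := h
  have hne : t ≠ [] := by intro hh; subst hh; simp at hl
  have h1 := mem_add_length_le_sum hpos (lastD_mem hne)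
  have hlen : (2 : Int) ≤ (t.length : Int) := by exact_mod_cast hl
  rw [hs] at h1
  omega

lemma mem_Blocks {k j : Nat} (hk : 3 ≤ k) (hj : j ≤ k - 1) (t : List Int) :
    t ∈ Blocks k j ↔ (IsPart (k : Int) t ∧ (k : Int) - (j : Int) ≤ lastD t) := by
  induction j with
  | zero =>
    simp only [Blocks, List.range_zero, List.flatMap_nil, List.not_mem_nil, false_iff]
    rintro ⟨hP, hle⟩
    have := lastD_le_of_isPart hP
    simp at hle
    omega
  | succ j ihj =>
    rw [Blocks_succ, List.mem_append, ihj (by omega),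
      mem_blockF hk (by omega) (by omega)]
    constructor
    · rintro (⟨hP, hle⟩ | ⟨hP, heq⟩)
      · refine ⟨hP, by push_cast; push_cast at hle; omega⟩
      · refine ⟨hP, by push_cast; rw [heq]; push_cast; omega⟩
    · rintro ⟨hP, hle⟩
      by_cases hcase : (k : Int) - (j : Int) ≤ lastD t
      · exact Or.inl ⟨hP, hcase⟩
      · refine Or.inr ⟨hP, by push_cast; push_cast at hle hcase; omega⟩

def goodMemo (memo : PySem.Dict Int (List (List Int))) : Prop :=
  ∀ k v, memo.get? k = some v → v = G k.toNat

lemma memG_pairwise {i : Nat} {t : List Int} (h : MemG i t) : t.Pairwise (· ≤ ·) :=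
  (memG_props h).1

lemma sorted_app_inj {c c' : List Int} {d : Int} (hc : c.Pairwise (· ≤ ·))
    (hc' : c'.Pairwise (· ≤ ·))
    (h : PySem.List.sorted (c ++ [d]) (fun x => x) = PySem.List.sorted (c' ++ [d]) (fun x => x)) :
    c = c' := by
  have p1 := PySem.List.sorted_perm (c ++ [d]) (fun x : Int => x) false
  have p2 := PySem.List.sorted_perm (c' ++ [d]) (fun x : Int => x) false
  have hp : (c ++ [d]).Perm (c' ++ [d]) := p1.symm.trans (h ▸ p2)
  have hcc : c.Perm c' := (List.perm_append_right_iff [d]).mp hp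
  exact hcc.eq_of_pairwise (fun a b _ _ h1 h2 => le_antisymm h1 h2) hc hc'

lemma aStep_spec {fuel : Nat} {n : Int} (hn : 3 ≤ n)
    (ih : ∀ (m : Int) (memo : PySem.Dict Int (List (List Int))), goodMemo memo → m.toNat < fuel →
      (aAux fuel m memo).1 = G m.toNat ∧ goodMemo (aAux fuel m memo).2)
    (hf : n.toNat ≤ fuel)
    {j : Nat} (hj : j < n.toNat - 1) (st : (List (List Int)) × PySem.Dict Int (List (List Int)))
    (h1 : st.1 = Blocks n.toNat j) (h2 : goodMemo st.2) :
    (aStep (fun i m => aAux fuel i m) n st (1 + (j : Int))).1 = Blocks n.toNat (j + 1)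
    ∧ goodMemo (aStep (fun i m => aAux fuel i m) n st (1 + (j : Int))).2 := by
  have hk3 : 3 ≤ n.toNat := by omega
  have hkn : (n.toNat : Int) = n := Int.toNat_of_nonneg (by omega)
  set k := n.toNat with hkdef
  set i : Int := 1 + (j : Int) with hidef
  have hitn : i.toNat = j + 1 := by omega
  obtain ⟨hprev, hgood'⟩ := ih i st.2 h2 (by omega)
  set d : Int := n - i with hddef
  have hd1 : 1 ≤ d := by omega
  have hdk : d = (k : Int) - (((j + 1 : Nat)) : Int) := by push_cast; omega
  have e : aStep (fun i m => aAux fuel i m) n st i =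
      (PySem.Set.add (PySem.Set.update st.1
        ((aAux fuel i st.2).1.map (fun c => PySem.List.sorted (c ++ [d]) (fun x => x))))
        (PySem.List.sorted [i, d] (fun x => x)), (aAux fuel i st.2).2) := rfl
  rw [e]
  refine ⟨?_, hgood'⟩
  rw [hprev, hitn]
  set f : List Int → List Int := fun c => PySem.List.sorted (c ++ [d]) (fun x => x) with hfdef
  have hGi := mem_G (j + 1)
  have hGinodup := nodup_G (j + 1)
  have hnew_nodup : ((G (j + 1)).map f).Nodup := by
    apply List.Nodup.map_on _ hGinodup
    intro c hc c' hc' heq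
    exact sorted_app_inj (memG_pairwise ((hGi c).mp hc)) (memG_pairwise ((hGi c').mp hc')) heq
  set mapped : List (List Int) :=
    ((G (j + 1)).filter (fun c => decide (lastD c ≤ d))).map (fun c => c ++ [d]) with hmapdef
  have hupd : PySem.Set.update st.1 ((G (j + 1)).map f) = st.1 ++ mapped := by
    rw [PySem.Set.update_eq_append_filter, PySem.Set.ofList_eq_self_of_nodup _ hnew_nodup]
    rw [List.filter_map]
    congr 1
    have hfc : ∀ c ∈ G (j + 1),
        ((fun y => !(PySem.Set.contains st.1 y)) ∘ f) c = decide (lastD c ≤ d) := by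
      intro c hc
      obtain ⟨hcp, hcpos, hcsum, hclen⟩ := memG_props ((hGi c).mp hc)
      have hcne : c ≠ [] := by intro hh; subst hh; simp at hclen
      by_cases hle : lastD c ≤ d
      · have hfc : f c = c ++ [d] :=
          sorted_append_of_le hcp (fun x hx => le_trans (le_lastD hcp hx) hle)
        have hnot : f c ∉ st.1 := by
          rw [h1, mem_Blocks hk3 (by omega)]
          rintro ⟨_, hge⟩
          rw [hfc, lastD_append] at hge
          omega
        simp [Function.comp, hle]
        exact hnot
      · have hperm := PySem.List.sorted_perm (c ++ [d]) (fun x : Int => x) false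
        have hcbig : 2 ≤ c.length := by
          rcases (hGi c).mp hc with ⟨_, rfl⟩ | ⟨_, hl2, _⟩
          · exfalso; apply hle; rw [lastD_singleton]; omega
          · exact hl2
        have hfP : IsPart (k : Int) (f c) := by
          refine ⟨?_, ?_, ?_, ?_⟩
          · rw [hperm.length_eq]; simp; omega
          · have := PySem.List.sorted_pairwise (c ++ [d]) (fun x : Int => x)
            simpa using this
          · intro x hx
            rcases List.mem_append.mp (hperm.mem_iff.mp hx) with h | h
            · exact hcpos x h
            · simp only [List.mem_singleton] at h; omega
          · rw [hperm.sum_eq]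
            rw [List.sum_append, hcsum]
            simp
            omega
        have hfmem : f c ∈ st.1 := by
          rw [h1, mem_Blocks hk3 (by omega)]
          refine ⟨hfP, ?_⟩
          have hmemlast : lastD c ∈ f c :=
            hperm.mem_iff.mpr (List.mem_append_left _ (lastD_mem hcne))
          have hfpair : (f c).Pairwise (· ≤ ·) := hfP.2.1
          have hle2 : lastD c ≤ lastD (f c) := le_lastD hfpair hmemlast
          omega
        simp [Function.comp, hle]
        exact hfmem
    rw [List.filter_congr hfc]
    apply List.map_congr_left
    intro c hcf
    obtain ⟨hcg, hcd⟩ := List.mem_filter.mp hcf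
    obtain ⟨hcp, _, _, _⟩ := memG_props ((hGi c).mp hcg)
    have hcd' : lastD c ≤ d := by simpa using hcd
    exact sorted_append_of_le hcp (fun x hx => le_trans (le_lastD hcp hx) hcd')
  rw [hupd]
  have hmapped_len : ∀ t ∈ mapped, 1 ≤ j → 3 ≤ t.length := by
    intro t ht hj1
    obtain ⟨c, hcf, rfl⟩ := List.mem_map.mp ht
    have hcg : c ∈ G (j + 1) := (List.mem_filter.mp hcf).1
    rcases (hGi c).mp hcg with ⟨habs, _⟩ | ⟨_, hl2, _⟩
    · omega
    · simp; omega
  have hBlocks_goal : Blocks k (j + 1) = Blocks k j ++ (mapped ++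
      (if 2 ≤ j + 1 ∧ 2 * (j + 1) ≤ k then [[((j + 1 : Nat) : Int), (k : Int) - ((j + 1 : Nat) : Int)]] else [])) := by
    rw [Blocks_succ]
    congr 1
    unfold blockF gBlock
    rw [← hdk, hmapdef]
  by_cases hiled : i ≤ d
  · have hq : PySem.List.sorted [i, d] (fun x : Int => x) = [i, d] := sorted_pair_le hiled
    rw [hq]
    by_cases hj0 : j = 0
    · subst hj0
      have hG1 : G 1 = [[1]] := by rw [G]; simp
      have hi1 : i = 1 := by simp [hidef]
      have hmapped1 : mapped = [[1, d]] := by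
        rw [hmapdef, hG1]
        have : lastD [(1 : Int)] ≤ d := by rw [lastD_singleton]; omega
        simp [this]
      have hqmem : [i, d] ∈ st.1 ++ mapped := by
        rw [hmapped1, hi1]
        simp
      rw [PySem.Set.add_of_mem hqmem, hBlocks_goal, h1]
      have hcond : ¬ (2 ≤ 0 + 1 ∧ 2 * (0 + 1) ≤ k) := by omega
      rw [if_neg hcond]
      simp
    · have hj1 : 1 ≤ j := by omega
      have hqnot : [i, d] ∉ st.1 ++ mapped := by
        intro hmem
        rcases List.mem_append.mp hmem with hmm | hmm
        · rw [h1, mem_Blocks hk3 (by omega)] at hmm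
          obtain ⟨_, hge⟩ := hmm
          have : lastD [i, d] = d := by simpa using lastD_append [i] d
          omega
        · have := hmapped_len _ hmm (by omega)
          simp at this
      rw [PySem.Set.add_of_not_mem hqnot, hBlocks_goal, h1]
      have hcond : 2 ≤ j + 1 ∧ 2 * (j + 1) ≤ k := by omega
      rw [if_pos hcond]
      have : [i, d] = [((j + 1 : Nat) : Int), (k : Int) - ((j + 1 : Nat) : Int)] := by
        rw [← hdk]
        congr 1
        push_cast
        omega
      rw [this, List.append_assoc]
  · have hq : PySem.List.sorted [i, d] (fun x : Int => x) = [d, i] :=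
      sorted_pair_gt (by omega)
    rw [hq]
    have hqmem : [d, i] ∈ st.1 ++ mapped := by
      apply List.mem_append_left
      rw [h1, mem_Blocks hk3 (by omega)]
      refine ⟨⟨by simp, ?_, ?_, ?_⟩, ?_⟩
      · simp; omega
      · intro x hx
        simp only [List.mem_cons, List.mem_singleton] at hx
        rcases hx with rfl | rfl | h
        · omega
        · omega
        · simp at h
      · simp; omega
      · have : lastD [d, i] = i := by simpa using lastD_append [d] i
        omega
    rw [PySem.Set.add_of_mem hqmem, hBlocks_goal, h1]
    have hcond : ¬ (2 ≤ j + 1 ∧ 2 * (j + 1) ≤ k) := by omega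
    rw [if_neg hcond]
    simp

lemma G_zero : G 0 = [] := by rw [G]; norm_num

lemma G_one : G 1 = [[1]] := by rw [G]; simp

lemma aAux_spec : ∀ (fuel : Nat) (n : Int) (memo : PySem.Dict Int (List (List Int))),
    goodMemo memo → n.toNat < fuel →
    (aAux fuel n memo).1 = G n.toNat ∧ goodMemo (aAux fuel n memo).2 := by
  intro fuel
  induction fuel with
  | zero => intro n memo _ h; omega
  | succ fuel ihf =>
    intro n memo hgm hlt
    by_cases hn1 : n = 1
    · subst hn1
      have e : aAux (fuel + 1) 1 memo = (PySem.Set.ofList [[1]], memo) := by simp [aAux]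
      rw [e]
      refine ⟨?_, hgm⟩
      rw [show (1 : Int).toNat = 1 from rfl, G_one]
      rfl
    · by_cases hn2 : n = 2
      · subst hn2
        have e : aAux (fuel + 1) 2 memo = (PySem.Set.ofList [[1, 1]], memo) := by simp [aAux]
        rw [e]
        refine ⟨?_, hgm⟩
        rw [show (2 : Int).toNat = 2 from rfl]
        rw [show G 2 = [[1, 1]] from by rw [G]; norm_num]
        rfl
      · cases hmemo : memo.get? n with
        | some v =>
          have e : aAux (fuel + 1) n memo = (v, memo) := by
            simp only [aAux, if_neg hn1, if_neg hn2, hmemo]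
          rw [e]
          exact ⟨hgm n v hmemo, hgm⟩
        | none =>
          by_cases hn0 : n ≤ 0
          · have hrange : PySem.List.pyRange 1 n = [] := by
              simp [PySem.List.pyRange]
              omega
            have e : aAux (fuel + 1) n memo = ([], memo.insert n []) := by
              simp only [aAux, if_neg hn1, if_neg hn2, hmemo, hrange, List.foldl_nil]
              rfl
            rw [e]
            have hnt : n.toNat = 0 := by omega
            refine ⟨by rw [hnt, G_zero], ?_⟩
            intro a v hv
            rw [PySem.Dict.get?_insert] at hv
            split_ifs at hv with hak
            · cases hv
              subst hak
              rw [hnt, G_zero]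
            · exact hgm a v hv
          · have hn3 : 3 ≤ n := by omega
            have hk3 : 3 ≤ n.toNat := by omega
            set k := n.toNat with hkdef
            set F := (PySem.List.pyRange 1 n).foldl
              (aStep (fun i m => aAux fuel i m) n)
              ((PySem.Set.empty : PySem.Set (List Int)), memo) with hFdef
            have e : aAux (fuel + 1) n memo = (F.1, F.2.insert n F.1) := by
              simp only [aAux, if_neg hn1, if_neg hn2, hmemo, hFdef]
            have main : ∀ (jj : Nat), jj ≤ k - 1 →
                ((PySem.List.pyRange 1 (1 + (jj : Int))).foldl
                  (aStep (fun i m => aAux fuel i m) n)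
                  ((PySem.Set.empty : PySem.Set (List Int)), memo)).1 = Blocks k jj ∧
                goodMemo ((PySem.List.pyRange 1 (1 + (jj : Int))).foldl
                  (aStep (fun i m => aAux fuel i m) n)
                  ((PySem.Set.empty : PySem.Set (List Int)), memo)).2 := by
              intro jj
              induction jj with
              | zero =>
                intro _
                have hr0 : PySem.List.pyRange 1 (1 + ((0 : Nat) : Int)) = [] := by
                  norm_num [PySem.List.pyRange]
                rw [hr0, List.foldl_nil]
                exact ⟨rfl, hgm⟩
              | succ jj ihj =>
                intro hjj
                have hpr : PySem.List.pyRange 1 (1 + ((jj + 1 : Nat) : Int)) =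
                    PySem.List.pyRange 1 (1 + (jj : Int)) ++ [1 + (jj : Int)] := by
                  have hc : (1 + ((jj + 1 : Nat) : Int)) = (1 + (jj : Int)) + 1 := by
                    push_cast; ring
                  rw [hc, PySem.List.pyRange_one_succ_right (by omega)]
                rw [hpr, List.foldl_append]
                obtain ⟨ha, hb⟩ := ihj (by omega)
                simp only [List.foldl_cons, List.foldl_nil]
                exact aStep_spec hn3 ihf (by omega) (by omega) _ ha hb
            have hfin := main (k - 1) (le_refl _)
            have hcast : (1 + ((k - 1 : Nat) : Int)) = n := by omega
            rw [hcast, ← hFdef] at hfin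
            obtain ⟨hF1, hF2⟩ := hfin
            have hGk : F.1 = G k := by
              rw [hF1, G_eq3 hk3]
              rfl
            rw [e]
            refine ⟨hGk, ?_⟩
            intro a v hv
            rw [PySem.Dict.get?_insert] at hv
            split_ifs at hv with hak
            · cases hv
              subst hak
              exact hGk
            · exact hF2 a v hv

lemma A_eq_G (n : Int) : possible_sums_BF n = G n.toNat := by
  unfold possible_sums_BF
  exact (aAux_spec (n.toNat + 1) n PySem.Dict.empty
    (fun k v hv => by rw [PySem.Dict.get?_empty] at hv; cases hv) (by omega)).1

lemma G_two : G 2 = [[1, 1]] := by rw [G]; norm_num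

lemma foldl_add_guard (l : List (List Int)) (P : List Int → Prop) [DecidablePred P]
    (f : List Int → List Int) :
    ∀ (s : PySem.Set (List Int)), (∀ c ∈ l, P c → f c ∉ s) →
    ((l.filter (fun c => decide (P c))).map f).Nodup →
    l.foldl (fun s c => if P c then PySem.Set.add s (f c) else s) s
      = s ++ (l.filter (fun c => decide (P c))).map f := by
  induction l with
  | nil => intro s _ _; simp
  | cons c rest ih =>
    intro s hfresh hnodup
    rw [List.foldl_cons]
    by_cases hp : P c
    · rw [if_pos hp, PySem.Set.add_of_not_mem (hfresh c (by simp) hp)]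
      rw [List.filter_cons_of_pos (by simpa using hp), List.map_cons] at hnodup ⊢
      have hnotc : f c ∉ (rest.filter (fun c => decide (P c))).map f :=
        (List.nodup_cons.mp hnodup).1
      rw [ih (s ++ [f c]) ?_ (List.nodup_cons.mp hnodup).2]
      · rw [List.append_assoc]
        rfl
      · intro c' hc' hp' hmem
        rcases List.mem_append.mp hmem with h | h
        · exact hfresh c' (by simp [hc']) hp' h
        · simp only [List.mem_singleton] at h
          exact hnotc (h ▸ List.mem_map_of_mem (List.mem_filter.mpr ⟨hc', by simpa using hp'⟩))
    · rw [if_neg hp, ih s (fun c' hc' => hfresh c' (by simp [hc'])) ?_]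
      · rw [List.filter_cons_of_neg (by simpa using hp)]
      · rwa [List.filter_cons_of_neg (by simpa using hp)] at hnodup

lemma bInner_spec {k : Nat} (hk3 : 3 ≤ k) (table : List (PySem.Set (List Int)))
    (htab : ∀ t : Nat, 1 ≤ t → t < k → table.getD t [] = G t)
    {j : Nat} (hj : j < k - 1) (s : PySem.Set (List Int)) (hs : s = Blocks k j) :
    bInner (k : Int) table s (1 + (j : Int)) = Blocks k (j + 1) := by
  set i : Int := 1 + (j : Int) with hidef
  set m : Int := (k : Int) - i with hmdef
  have hm1 : 1 ≤ m := by omega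
  have hdk : m = (k : Int) - (((j + 1 : Nat)) : Int) := by push_cast; omega
  have hcast : i = ((j + 1 : Nat) : Int) := by push_cast; omega
  have htg : PySem.List.pyGetD table i [] = G (j + 1) := by
    rw [hcast, PySem.List.pyGetD_natCast]
    exact htab (j + 1) (by omega) (by omega)
  have hGi := mem_G (j + 1)
  set mapped : List (List Int) :=
    ((G (j + 1)).filter (fun c => decide (lastD c ≤ m))).map (fun c => c ++ [m]) with hmapdef
  have hmnodup : mapped.Nodup := by
    rw [hmapdef]
    apply List.Nodup.map_on
    · intro c hc c' hc' heq
      have := congrArg List.dropLast heq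
      simpa using this
    · exact List.Nodup.filter _ (nodup_G (j + 1))
  have hswap : (fun (s : PySem.Set (List Int)) (c : List Int) =>
      if PySem.List.pyGetD c (-1) 0 ≤ m then PySem.Set.add s (c ++ [m]) else s)
      = (fun (s : PySem.Set (List Int)) (c : List Int) =>
      if lastD c ≤ m then PySem.Set.add s (c ++ [m]) else s) := rfl
  have hinner : (PySem.List.pyGetD table i []).foldl (fun s c =>
      if PySem.List.pyGetD c (-1) 0 ≤ m then PySem.Set.add s (c ++ [m]) else s) s
      = Blocks k j ++ mapped := by
    rw [htg, hs, hswap, hmapdef]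
    apply foldl_add_guard (G (j + 1)) (fun c => lastD c ≤ m) (fun c => c ++ [m])
    · intro c hc hp hmem
      rw [mem_Blocks hk3 (by omega)] at hmem
      obtain ⟨_, hge⟩ := hmem
      rw [lastD_append] at hge
      omega
    · rw [← hmapdef]
      exact hmnodup
  have hmapped_len : ∀ t ∈ mapped, 1 ≤ j → 3 ≤ t.length := by
    intro t ht hj1
    obtain ⟨c, hcf, rfl⟩ := List.mem_map.mp ht
    have hcg : c ∈ G (j + 1) := (List.mem_filter.mp hcf).1
    rcases (hGi c).mp hcg with ⟨habs, _⟩ | ⟨_, hl2, _⟩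
    · omega
    · simp; omega
  have hBg : Blocks k (j + 1) = Blocks k j ++ (mapped ++
      (if 2 ≤ j + 1 ∧ 2 * (j + 1) ≤ k then [[((j + 1 : Nat) : Int), (k : Int) - ((j + 1 : Nat) : Int)]] else [])) := by
    rw [Blocks_succ]
    congr 1
    unfold blockF gBlock
    rw [← hdk, hmapdef]
  show (if 2 ≤ i ∧ i ≤ m then PySem.Set.add ((PySem.List.pyGetD table i []).foldl (fun s c =>
      if PySem.List.pyGetD c (-1) 0 ≤ m then PySem.Set.add s (c ++ [m]) else s) s) [i, m]
      else (PySem.List.pyGetD table i []).foldl (fun s c =>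
      if PySem.List.pyGetD c (-1) 0 ≤ m then PySem.Set.add s (c ++ [m]) else s) s) = Blocks k (j + 1)
  rw [hinner]
  by_cases hcond : 2 ≤ i ∧ i ≤ m
  · rw [if_pos hcond]
    have hj1 : 1 ≤ j := by omega
    have hqnot : [i, m] ∉ Blocks k j ++ mapped := by
      intro hmem
      rcases List.mem_append.mp hmem with hmm | hmm
      · rw [mem_Blocks hk3 (by omega)] at hmm
        obtain ⟨_, hge⟩ := hmm
        have : lastD [i, m] = m := by simpa using lastD_append [i] m
        omega
      · have := hmapped_len _ hmm (by omega)
        simp at this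
    rw [PySem.Set.add_of_not_mem hqnot, hBg]
    have hc2 : 2 ≤ j + 1 ∧ 2 * (j + 1) ≤ k := by omega
    rw [if_pos hc2]
    have : [i, m] = [((j + 1 : Nat) : Int), (k : Int) - ((j + 1 : Nat) : Int)] := by
      rw [← hdk, hcast]
    rw [this, List.append_assoc]
  · rw [if_neg hcond, hBg]
    have hc2 : ¬ (2 ≤ j + 1 ∧ 2 * (j + 1) ≤ k) := by omega
    rw [if_neg hc2]
    simp

lemma bStep_spec {n : Int} (hn : 2 ≤ n) :
    ∀ jm : Nat, jm ≤ n.toNat - 2 →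
    (PySem.List.pyRange 3 (3 + (jm : Int))).foldl bStep
        [PySem.Set.empty, PySem.Set.ofList [[1]], PySem.Set.ofList [[1, 1]]]
      = [[], [[1]], [[1, 1]]] ++ (List.range jm).map (fun t => G (t + 3)) := by
  intro jm
  induction jm with
  | zero =>
    intro _
    have hr : PySem.List.pyRange 3 (3 + ((0 : Nat) : Int)) = [] := by
      norm_num [PySem.List.pyRange]
    rw [hr, List.foldl_nil]
    rfl
  | succ jm ihj =>
    intro hjj
    have hpr : PySem.List.pyRange 3 (3 + ((jm + 1 : Nat) : Int)) =
        PySem.List.pyRange 3 (3 + (jm : Int)) ++ [3 + (jm : Int)] := by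
      have hc : (3 + ((jm + 1 : Nat) : Int)) = (3 + (jm : Int)) + 1 := by push_cast; ring
      rw [hc, PySem.List.pyRange_one_succ_right (by omega)]
    rw [hpr, List.foldl_append, ihj (by omega)]
    simp only [List.foldl_cons, List.foldl_nil]
    set tbl : List (PySem.Set (List Int)) :=
      [[], [[1]], [[1, 1]]] ++ (List.range jm).map (fun t => G (t + 3)) with htbl
    have hk3 : 3 ≤ jm + 3 := by omega
    have htab : ∀ t : Nat, 1 ≤ t → t < jm + 3 → tbl.getD t [] = G t := by
      intro t h1 hlt
      match t, h1 with
      | 1, _ => rw [htbl]; rw [G_one]; rfl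
      | 2, _ => rw [htbl]; rw [G_two]; rfl
      | (s + 3), _ =>
        rw [htbl]
        show ([] :: [[1]] :: [[1, 1]] :: (List.range jm).map (fun t => G (t + 3))).getD (s + 3) []
          = G (s + 3)
        rw [List.getD_cons_succ, List.getD_cons_succ, List.getD_cons_succ,
          List.getD_eq_getElem?_getD, List.getElem?_map, List.getElem?_range (by omega : s < jm)]
        rfl
    have hkc : ((jm + 3 : Nat) : Int) = 3 + (jm : Int) := by push_cast; ring
    have hinn : ∀ jj : Nat, jj ≤ jm + 2 →
        (PySem.List.pyRange 1 (1 + (jj : Int))).foldl (bInner ((jm + 3 : Nat) : Int) tbl)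
          PySem.Set.empty = Blocks (jm + 3) jj := by
      intro jj
      induction jj with
      | zero =>
        intro _
        have hr : PySem.List.pyRange 1 (1 + ((0 : Nat) : Int)) = [] := by
          norm_num [PySem.List.pyRange]
        rw [hr, List.foldl_nil]
        rfl
      | succ jj ihjj =>
        intro hjj2
        have hpr2 : PySem.List.pyRange 1 (1 + ((jj + 1 : Nat) : Int)) =
            PySem.List.pyRange 1 (1 + (jj : Int)) ++ [1 + (jj : Int)] := by
          have hc : (1 + ((jj + 1 : Nat) : Int)) = (1 + (jj : Int)) + 1 := by push_cast; ring
          rw [hc, PySem.List.pyRange_one_succ_right (by omega)]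
        rw [hpr2, List.foldl_append, ihjj (by omega)]
        simp only [List.foldl_cons, List.foldl_nil]
        exact bInner_spec hk3 tbl htab (by omega) _ rfl
    have hfin := hinn (jm + 2) (le_refl _)
    have hc2 : (1 + ((jm + 2 : Nat) : Int)) = 3 + (jm : Int) := by push_cast; ring
    rw [hc2, ← hkc] at hfin
    show tbl ++ [(PySem.List.pyRange 1 (3 + (jm : Int))).foldl (bInner (3 + (jm : Int)) tbl)
        PySem.Set.empty] = [[], [[1]], [[1, 1]]] ++ (List.range (jm + 1)).map (fun t => G (t + 3))
    rw [← hkc, hfin]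
    have hG : Blocks (jm + 3) (jm + 2) = G (jm + 3) := by
      rw [G_eq3 hk3]
      rfl
    rw [hG, List.range_succ, List.map_append, htbl]
    simp

lemma B_eq_G (n : Int) : possible_sums_BF_alt n = G n.toNat := by
  unfold possible_sums_BF_alt
  by_cases hn1 : n = 1
  · subst hn1
    rw [if_pos rfl, show (1 : Int).toNat = 1 from rfl, G_one]
    rfl
  · rw [if_neg hn1]
    by_cases hn0 : n < 1
    · rw [if_pos hn0]
      have : n.toNat = 0 := by omega
      rw [this, G_zero]
      rfl
    · rw [if_neg hn0]
      have hn2 : 2 ≤ n := by omega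
      have hmain := bStep_spec hn2 (n.toNat - 2) (le_refl _)
      have hcast : (3 + ((n.toNat - 2 : Nat) : Int)) = n + 1 := by omega
      rw [hcast] at hmain
      show PySem.List.pyGetD ((PySem.List.pyRange 3 (n + 1)).foldl bStep
        [PySem.Set.empty, PySem.Set.ofList [[1]], PySem.Set.ofList [[1, 1]]]) n [] = G n.toNat
      rw [hmain]
      set N := n.toNat with hNdef
      have hN : ((N : Nat) : Int) = n := by omega
      rw [← hN, PySem.List.pyGetD_natCast]
      by_cases hN2 : N = 2
      · rw [hN2, G_two]
        rfl
      · obtain ⟨s, hs⟩ : ∃ s, N = s + 3 := ⟨N - 3, by omega⟩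
        have h1 : N - 2 = s + 1 := by omega
        rw [h1, hs]
        show ([] :: [[1]] :: [[1, 1]] :: (List.range (s + 1)).map (fun t => G (t + 3))).getD
          (s + 3) [] = G (s + 3)
        rw [List.getD_cons_succ, List.getD_cons_succ, List.getD_cons_succ,
          List.getD_eq_getElem?_getD, List.getElem?_map, List.getElem?_range (by omega : s < s + 1)]
        rfl

-- ===== VERDICT (by name: the statement is the Claim_ definition above) =====
theorem possible_sums_BF_spec : Claim_equal_possible_sums_BF := by
  intro n _
  unfold Spec_possible_sums_BF
  rw [A_eq_G, B_eq_G]
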